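-- pv_equiv track=rewrite | github.com/SuperAce100/icrl | src/icrl/harbor/adapter.py | _extract_quoted_block
-- ===== SOURCE A (Python) =====
-- def _extract_quoted_block(lines: list[str]) -> str:
--     """Extract a `bash -c "<...>"` block, dropping trailing commands.
--
--     The model sometimes emits multi-line actions like:
--         bash -lc "<script...>"
--         submit
--
--     We must only execute the *first* shell command, not the trailing lines.
--     This implementation finds the closing quote of the -c/-lc argument and
--     truncates everything after it.
--     """
--     full = "\n".join(lines)
--
--     # Find the -c/-lc argument start (near the beginning).
--     idx_lc = full.find(" -lc")
--     idx_c = full.find(" -c")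
--     idxs = [i for i in (idx_lc, idx_c) if i != -1]
--     if not idxs:
--         return lines[0].strip()
--
--     start = min(idxs)
--     token = " -lc" if start == idx_lc else " -c"
--
--     i = start + len(token)
--     while i < len(full) and full[i].isspace():
--         i += 1
--     if i >= len(full):
--         return lines[0].strip()
--
--     quote = full[i]
--     if quote not in ("'", '"'):
--         # Unquoted -c argument; fall back to first line only.
--         return lines[0].strip()
--
--     # Scan for the matching closing quote (best-effort, handles backslash escapes).
--     i += 1
--     escaped = False
--     while i < len(full):
--         ch = full[i]
--         if escaped:
--             escaped = False
--         elif ch == "\\":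
--             escaped = True
--         elif ch == quote:
--             end = i + 1
--             return full[:end].strip()
--         i += 1
--
--     # If we can't find a closing quote, keep the whole block.
--     return full.strip()
-- ===== SOURCE B (Python) =====
-- def _closes(part: str) -> bool:
--     """True iff a quote placed right after `part` is unescaped (the run of
--     backslashes at the end of `part` has even length)."""
--     even = True
--     for ch in reversed(part):
--         if ch != "\\":
--             break
--         even = not even
--     return even
--
--
-- def _extract_quoted_block(lines: list[str]) -> str:
--     full = "\n".join(lines)
--
--     hits = [p for p in (full.find(" -lc"), full.find(" -c")) if p != -1]
--     if not hits:
--         return lines[0].strip()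
--     start = min(hits)
--     token_len = 4 if full[start:start + 4] == " -lc" else 3
--
--     body = full[start + token_len:].lstrip()
--     if not body or body[0] not in ("'", '"'):
--         return lines[0].strip()
--     quote = body[0]
--
--     # Jump from quote to quote instead of walking char by char: each candidate
--     # closing quote is accepted iff the backslash run just before it is even.
--     pos = len(full) - len(body) + 1      # index in `full` just past the opening quote
--     segment = body[1:]
--     while True:
--         k = segment.find(quote)
--         if k == -1:
--             return full.strip()
--         if _closes(segment[:k]):
--             return full[:pos + k + 1].strip()
--         pos += k + 1
--         segment = segment[k + 1:]
-- ===== Notes on version B (the rewrite author's own statement) =====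
-- stated objective: alternative
-- what changed: A walks the quoted region one character at a time with an escaped flag; B jumps directly from quote occurrence to quote occurrence with str.find and accepts a candidate closing quote iff the backslash run immediately before it has even length.
-- outside the precondition, e.g. on _extract_quoted_block([]): A raises IndexError, B raises IndexError
import Mathlib
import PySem

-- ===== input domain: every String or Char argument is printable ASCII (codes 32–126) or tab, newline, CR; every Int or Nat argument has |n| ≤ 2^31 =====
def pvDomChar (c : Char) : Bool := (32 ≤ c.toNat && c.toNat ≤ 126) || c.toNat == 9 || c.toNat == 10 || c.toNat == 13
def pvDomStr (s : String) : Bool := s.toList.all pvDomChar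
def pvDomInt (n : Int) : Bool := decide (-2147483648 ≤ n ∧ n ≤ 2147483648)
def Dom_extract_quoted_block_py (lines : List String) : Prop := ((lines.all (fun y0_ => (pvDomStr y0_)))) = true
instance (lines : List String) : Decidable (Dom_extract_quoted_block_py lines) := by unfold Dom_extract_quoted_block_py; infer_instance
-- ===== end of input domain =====

-- B replaces A's character-by-character escape-flag scan by quote-to-quote jumps with
-- str.find, accepting a candidate closing quote iff the backslash run before it is even
-- (objective: alternative, same asymptotic cost).

-- ===== PORT A =====
-- A's closing-quote loop: walks the characters after the opening quote with an
-- `escaped` flag; returns the relative index of the first unescaped `quote`.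
def pvAScan (quote : Char) : List Char → Bool → Option Nat
  | [], _ => none
  | c :: rest, escaped =>
    if escaped then (pvAScan quote rest false).map (· + 1)
    else if c = '\\' then (pvAScan quote rest true).map (· + 1)
    else if c = quote then some 0
    else (pvAScan quote rest false).map (· + 1)

def extract_quoted_block_py (lines : List String) : String :=
  let full := PySem.Chars.join ['\n'] (lines.map String.toList)     -- full = "\n".join(lines)
  let idx_lc := PySem.Chars.find full (" -lc".toList)
  let idx_c := PySem.Chars.find full (" -c".toList)
  let idxs := [idx_lc, idx_c].filter (fun i => i != -1)
  match PySem.List.min? idxs id with                                -- if not idxs: …; start = min(idxs)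
  | none => String.ofList (PySem.Chars.strip ((PySem.List.pyGet? lines 0).getD "").toList)
  | some start =>
    let tokenLen : Nat := if start = idx_lc then 4 else 3           -- token = " -lc" / " -c"
    let i := start.toNat + tokenLen                                 -- start ≥ 0: a find result ≠ -1
    let tail := full.drop i
    -- while i < len(full) and full[i].isspace(): i += 1   (ws = how far the loop moved)
    let ws := (tail.takeWhile PySem.Chars.isspace).length
    match tail.dropWhile PySem.Chars.isspace with
    | [] => String.ofList (PySem.Chars.strip ((PySem.List.pyGet? lines 0).getD "").toList)
    | quote :: afterQ =>
      if quote = '\'' ∨ quote = '"' then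
        match pvAScan quote afterQ false with
        | some k => String.ofList (PySem.Chars.strip (full.take (i + ws + 1 + k + 1)))  -- full[:end].strip()
        | none => String.ofList (PySem.Chars.strip full)                                -- full.strip()
      else String.ofList (PySem.Chars.strip ((PySem.List.pyGet? lines 0).getD "").toList)

-- ===== PORT B =====
-- _closes(part): loop over reversed(part) toggling `even` while the char is a backslash.
def pvCloses : List Char → Bool → Bool
  | [], even => even
  | c :: rest, even => if c ≠ '\\' then even else pvCloses rest (!even)

-- B's while-True loop: k = segment.find(quote); -1 → full.strip(); _closes(segment[:k])
-- → full[:pos+k+1].strip(); else advance pos and slice segment = segment[k+1:].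
def pvBLoop (quote : Char) (full : List Char) (pos : Nat) (segment : List Char) : String :=
  let k := PySem.Chars.find segment [quote]
  if hk : k = -1 then String.ofList (PySem.Chars.strip full)
  else
    if pvCloses (segment.take k.toNat).reverse true then
      String.ofList (PySem.Chars.strip (full.take (pos + k.toNat + 1)))
    else pvBLoop quote full (pos + k.toNat + 1) (segment.drop (k.toNat + 1))
termination_by segment.length
decreasing_by
  have hinf : [quote] <:+: segment := by
    by_contra hc
    exact hk ((PySem.Chars.find_eq_neg_one_iff segment [quote]).2 hc)
  have h1 : 1 ≤ segment.length := by
    simpa using hinf.length_le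
  simp only [List.length_drop]
  omega

def extract_quoted_block_py_alt (lines : List String) : String :=
  let full := PySem.Chars.join ['\n'] (lines.map String.toList)
  let hits := [PySem.Chars.find full (" -lc".toList), PySem.Chars.find full (" -c".toList)].filter (fun i => i != -1)
  match PySem.List.min? hits id with
  | none => String.ofList (PySem.Chars.strip ((PySem.List.pyGet? lines 0).getD "").toList)
  | some start =>
    let tokenLen : Nat := if PySem.Chars.slice full (some start) (some (start + 4)) = " -lc".toList then 4 else 3
    let body := PySem.Chars.lstrip (PySem.Chars.slice full (some (start + (tokenLen : Int))) none)
    match body with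
    | [] => String.ofList (PySem.Chars.strip ((PySem.List.pyGet? lines 0).getD "").toList)
    | quote :: segment =>      -- quote = body[0], segment = body[1:]
      if quote = '\'' ∨ quote = '"' then
        pvBLoop quote full (full.length - body.length + 1) segment   -- pos = len(full)-len(body)+1
      else String.ofList (PySem.Chars.strip ((PySem.List.pyGet? lines 0).getD "").toList)

-- ===== PRECONDITION & SPEC =====
-- A raises IndexError on lines = [] (the `lines[0]` fallback); Pre_ excludes exactly that.
def Pre_extract_quoted_block_py (lines : List String) : Prop := lines ≠ []
instance (lines : List String) : Decidable (Pre_extract_quoted_block_py lines) := by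
  unfold Pre_extract_quoted_block_py; infer_instance

def pvWitness_extract_quoted_block_py : List String := ["bash -lc \"echo hi\"", "submit"]

def Spec_extract_quoted_block_py (lines : List String) (out : String) : Prop := out = extract_quoted_block_py_alt lines
instance (lines : List String) (out : String) : Decidable (Spec_extract_quoted_block_py lines out) := by
  unfold Spec_extract_quoted_block_py; infer_instance

-- ===== CLAIM (what is proved, stated in full; the proofs are below) =====
def Claim_equal_extract_quoted_block_py : Prop := ∀ (lines : List String), Dom_extract_quoted_block_py lines → Pre_extract_quoted_block_py lines → Spec_extract_quoted_block_py lines (extract_quoted_block_py lines)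

-- ===== LEMMAS AND PROOFS =====

-- escape flag after A's scan has processed a (quote-free) chunk of characters
def pvEscAfter : List Char → Bool → Bool
  | [], e => e
  | c :: cs, e => pvEscAfter cs (if e then false else decide (c = '\\'))

theorem pvEscAfter_append (xs ys : List Char) (e : Bool) :
    pvEscAfter (xs ++ ys) e = pvEscAfter ys (pvEscAfter xs e) := by
  induction xs generalizing e with
  | nil => rfl
  | cons c cs ih => simp [pvEscAfter, ih]

theorem pvCloses_not (rev : List Char) (b : Bool) : pvCloses rev (!b) = !(pvCloses rev b) := by
  induction rev generalizing b with
  | nil => rfl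
  | cons c cs ih =>
    by_cases hc : c = '\\' <;> simp [pvCloses, hc, ih]

-- L3: the escape flag at the candidate quote is the negation of _closes(part)
theorem pvEscAfter_eq_not_closes (part : List Char) :
    pvEscAfter part false = !(pvCloses part.reverse true) := by
  induction part using List.reverseRecOn with
  | nil => rfl
  | append_singleton xs c ih =>
    rw [pvEscAfter_append]
    by_cases hc : c = '\\'
    · have : pvCloses (xs ++ [c]).reverse true = pvCloses xs.reverse (!true) := by
        simp [pvCloses, hc]
      rw [this, pvCloses_not]
      cases h : pvEscAfter xs false <;> simp_all [pvEscAfter, hc]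
    · have : pvCloses (xs ++ [c]).reverse true = true := by
        simp [pvCloses, hc]
      rw [this]
      cases h : pvEscAfter xs false <;> simp [pvEscAfter, hc, h]

-- L2: no quote in the chunk → A's scan finds nothing
theorem pvAScan_none (quote : Char) (cs : List Char) (h : quote ∉ cs) (e : Bool) :
    pvAScan quote cs e = none := by
  induction cs generalizing e with
  | nil => rfl
  | cons c rest ih =>
    have hc : c ≠ quote := fun hq => h (hq ▸ List.mem_cons_self)
    have hr : quote ∉ rest := fun hm => h (List.mem_cons_of_mem _ hm)
    by_cases he : e
    · simp [pvAScan, he, ih hr]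
    · by_cases hb : c = '\\' <;>
        simp [pvAScan, he, hb, hc, ih hr]

-- L1: A's scan across a quote-free chunk followed by the quote
theorem pvAScan_split (quote : Char) (part : List Char) (hq : quote ∉ part)
    (hbs : quote ≠ '\\') (rest : List Char) (e : Bool) :
    pvAScan quote (part ++ quote :: rest) e =
      if pvEscAfter part e then (pvAScan quote rest false).map (· + (part.length + 1))
      else some part.length := by
  induction part generalizing e with
  | nil =>
    by_cases he : e
    · simp only [List.nil_append, pvAScan, he, if_pos rfl, pvEscAfter, List.length_nil]
      cases pvAScan quote rest false <;> simp
    · simp [pvAScan, he, hbs, pvEscAfter]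
  | cons c part' ih =>
    have hc : c ≠ quote := fun h => hq (h ▸ List.mem_cons_self)
    have hr : quote ∉ part' := fun hm => hq (List.mem_cons_of_mem _ hm)
    by_cases he : e
    · rw [show ((c :: part') ++ quote :: rest) = c :: (part' ++ quote :: rest) by simp,
        show pvAScan quote (c :: (part' ++ quote :: rest)) e = (pvAScan quote (part' ++ quote :: rest) false).map (· + 1) by
          simp [pvAScan, he]]
      rw [ih hr false]
      by_cases h2 : pvEscAfter part' false <;>
        · simp only [pvEscAfter, he, if_pos rfl, h2, if_true, if_false]
          first
          | (cases pvAScan quote rest false <;> simp [pvEscAfter, h2] <;> omega)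
          | simp [pvEscAfter, h2]
    · by_cases hb : c = '\\'
      · rw [show ((c :: part') ++ quote :: rest) = c :: (part' ++ quote :: rest) by simp,
          show pvAScan quote (c :: (part' ++ quote :: rest)) e = (pvAScan quote (part' ++ quote :: rest) true).map (· + 1) by
            simp [pvAScan, he, hb]]
        rw [ih hr true]
        by_cases h2 : pvEscAfter part' true <;>
          · simp only [pvEscAfter, he, hb, if_false, decide_true, h2]
            first
            | (cases pvAScan quote rest false <;> simp [pvEscAfter, hb, h2] <;> omega)
            | simp [pvEscAfter, hb, h2]
      · rw [show ((c :: part') ++ quote :: rest) = c :: (part' ++ quote :: rest) by simp,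
          show pvAScan quote (c :: (part' ++ quote :: rest)) e = (pvAScan quote (part' ++ quote :: rest) false).map (· + 1) by
            simp [pvAScan, he, hb, hc]]
        rw [ih hr false]
        by_cases h2 : pvEscAfter part' false <;>
          · simp only [pvEscAfter, he, hb, if_false, decide_false, h2]
            first
            | (cases pvAScan quote rest false <;> simp [pvEscAfter, hb, h2] <;> omega)
            | simp [pvEscAfter, hb, h2]

-- the two closing-quote searches agree
theorem pvBLoop_eq_scan (quote : Char) (hbs : quote ≠ '\\') :
    ∀ segment full pos, pvBLoop quote full pos segment =
      (match pvAScan quote segment false with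
       | some k => String.ofList (PySem.Chars.strip (full.take (pos + k + 1)))
       | none => String.ofList (PySem.Chars.strip full)) := by
  have main : ∀ n segment, segment.length ≤ n → ∀ full pos, pvBLoop quote full pos segment =
      (match pvAScan quote segment false with
       | some k => String.ofList (PySem.Chars.strip (full.take (pos + k + 1)))
       | none => String.ofList (PySem.Chars.strip full)) := by
    intro n
    induction n with
    | zero =>
      intro segment hlen full pos
      have hseg : segment = [] := List.eq_nil_of_length_eq_zero (Nat.le_zero.1 hlen)
      subst hseg
      have hk : PySem.Chars.find [] [quote] = -1 :=
        (PySem.Chars.find_eq_neg_one_iff _ _).2 (by simp)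
      rw [pvBLoop]
      simp [hk, pvAScan]
    | succ n ih =>
      intro segment hlen full pos
      rw [pvBLoop]
      by_cases hk : PySem.Chars.find segment [quote] = -1
      · have hni : ¬ [quote] <:+: segment := (PySem.Chars.find_eq_neg_one_iff _ _).1 hk
        have hnm : quote ∉ segment := fun hm => hni ((List.singleton_infix_iff quote segment).2 hm)
        rw [pvAScan_none quote segment hnm false]
        simp [hk]
      · have h0 : 0 ≤ PySem.Chars.find segment [quote] := by
          have := PySem.Chars.neg_one_le_find segment [quote]; omega
        obtain ⟨hpre, hmin⟩ := PySem.Chars.find_spec h0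
        set kn := (PySem.Chars.find segment [quote]).toNat with hkn
        obtain ⟨t, ht⟩ := hpre
        have hdrop1 : segment.drop (kn + 1) = t := by
          have h1 : (segment.drop kn).drop 1 = t := by rw [← ht]; simp
          rw [List.drop_drop] at h1
          simpa [Nat.add_comm] using h1
        have hknlt : kn < segment.length := by
          have : (segment.drop kn).length = segment.length - kn := List.length_drop ..
          rw [← ht] at this; simp at this; omega
        have hseg : segment = segment.take kn ++ quote :: segment.drop (kn + 1) := by
          conv_lhs => rw [← List.take_append_drop kn segment]
          rw [← ht, hdrop1]; simp
        have hnot : quote ∉ segment.take kn := by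
          intro hm
          obtain ⟨i, hi, hget⟩ := List.getElem_of_mem hm
          have hilt : i < kn := by simp at hi; omega
          have hgs : segment[i]'(by omega) = quote := by
            rw [List.getElem_take] at hget; exact hget
          exact hmin i hilt ⟨segment.drop (i+1), by
            rw [List.singleton_append, ← hgs, ← List.drop_eq_getElem_cons]⟩
        have hlen' : (segment.drop (kn+1)).length ≤ n := by
          simp; omega
        have htk : (segment.take kn).length = kn := by simp; omega
        conv_rhs => rw [hseg]
        rw [pvAScan_split quote _ hnot hbs _ false, pvEscAfter_eq_not_closes, htk]
        by_cases hcl : pvCloses (segment.take kn).reverse true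
        · simp [hk, hcl]
        · simp only [hcl, Bool.not_false, if_true, hk, dif_neg, if_neg, Bool.false_eq_true,
            not_false_iff]
          rw [ih _ hlen' full (pos + kn + 1)]
          cases pvAScan quote (segment.drop (kn+1)) false with
          | none => simp [hk, hcl]
          | some k' =>
            simp only [Option.map_some]
            rw [show pos + kn + 1 + k' + 1 = pos + (k' + (kn + 1)) + 1 by omega]
  intro segment full pos
  exact main segment.length segment le_rfl full pos

theorem pvTailEq (lines : List String) (full : List Char) (i : Nat) (hle : i ≤ full.length) :
    (match (full.drop i).dropWhile PySem.Chars.isspace with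
      | [] => String.ofList (PySem.Chars.strip ((PySem.List.pyGet? lines 0).getD "").toList)
      | quote :: afterQ =>
        if quote = '\'' ∨ quote = '"' then
          match pvAScan quote afterQ false with
          | some k => String.ofList (PySem.Chars.strip (full.take (i + ((full.drop i).takeWhile PySem.Chars.isspace).length + 1 + k + 1)))
          | none => String.ofList (PySem.Chars.strip full)
        else String.ofList (PySem.Chars.strip ((PySem.List.pyGet? lines 0).getD "").toList))
    = (match PySem.Chars.lstrip (PySem.Chars.slice full (some (i : Int)) none) with
      | [] => String.ofList (PySem.Chars.strip ((PySem.List.pyGet? lines 0).getD "").toList)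
      | quote :: segment =>
        if quote = '\'' ∨ quote = '"' then
          pvBLoop quote full (full.length - (PySem.Chars.lstrip (PySem.Chars.slice full (some (i : Int)) none)).length + 1) segment
        else String.ofList (PySem.Chars.strip ((PySem.List.pyGet? lines 0).getD "").toList)) := by
  have hsl : PySem.Chars.slice full (some (i : Int)) none = full.drop i := by
    rw [PySem.Chars.slice_eq_listSlice, PySem.List.slice_from full (by positivity)]
    simp
  rw [hsl]
  have hls : PySem.Chars.lstrip (full.drop i) = (full.drop i).dropWhile PySem.Chars.isspace := rfl
  rw [hls]
  cases hbody : (full.drop i).dropWhile PySem.Chars.isspace with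
  | nil => rfl
  | cons quote segment =>
    by_cases hq : quote = '\'' ∨ quote = '"'
    · simp only [if_pos hq]
      have hbs : quote ≠ '\\' := by rcases hq with h | h <;> subst h <;> decide
      rw [pvBLoop_eq_scan quote hbs]
      have hpos : full.length - (quote :: segment).length + 1
          = i + ((full.drop i).takeWhile PySem.Chars.isspace).length + 1 := by
        have h1 : ((full.drop i).takeWhile PySem.Chars.isspace).length
            + ((full.drop i).dropWhile PySem.Chars.isspace).length = (full.drop i).length := by
          rw [← List.length_append, List.takeWhile_append_dropWhile]
        rw [hbody] at h1
        simp only [List.length_cons, List.length_drop] at h1 ⊢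
        omega
      rw [hpos]
    · simp only [if_neg hq]


theorem pv_find_facts {F sub : List Char} {s : Int} (h0 : 0 ≤ s) (hp : sub <+: F.drop s.toNat) :
    PySem.Chars.find F sub ≠ -1 ∧ PySem.Chars.find F sub ≤ s := by
  have hin : sub <:+: F := by
    have := (PySem.Chars.exists_prefix_drop_iff_isIn (s := F) (sub := sub)).1 ⟨s.toNat, hp⟩
    exact (PySem.Chars.isIn_iff_infix sub F).1 this
  have hne : PySem.Chars.find F sub ≠ -1 := by
    intro h; exact ((PySem.Chars.find_eq_neg_one_iff F sub).1 h) hin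
  have h0f : 0 ≤ PySem.Chars.find F sub := by
    have := PySem.Chars.neg_one_le_find F sub; omega
  refine ⟨hne, ?_⟩
  by_contra hlt
  push_neg at hlt
  obtain ⟨_, hmin⟩ := PySem.Chars.find_spec h0f
  exact hmin s.toNat (by omega) hp

theorem pv_slice_of_prefix {F sub : List Char} {s : Int} (h0 : 0 ≤ s)
    (hp : sub <+: F.drop s.toNat) (hl : sub.length = 4) :
    PySem.Chars.slice F (some s) (some (s + 4)) = sub := by
  obtain ⟨m, rfl⟩ : ∃ m : Nat, s = (m : Int) := ⟨s.toNat, (Int.toNat_of_nonneg h0).symm⟩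
  rw [Int.toNat_natCast] at hp
  rw [PySem.Chars.slice_eq_listSlice, show ((m : Int) + 4) = ((m + 4 : Nat) : Int) by push_cast; ring,
    PySem.List.slice_natCast, show m + 4 - m = 4 by omega]
  obtain ⟨t, ht⟩ := hp
  rw [← ht, ← hl, List.take_left]

theorem pv_prefix_of_slice {F sub : List Char} {s : Int} (h0 : 0 ≤ s)
    (he : PySem.Chars.slice F (some s) (some (s + 4)) = sub) : sub <+: F.drop s.toNat := by
  obtain ⟨m, rfl⟩ : ∃ m : Nat, s = (m : Int) := ⟨s.toNat, (Int.toNat_of_nonneg h0).symm⟩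
  rw [PySem.Chars.slice_eq_listSlice, show ((m : Int) + 4) = ((m + 4 : Nat) : Int) by push_cast; ring,
    PySem.List.slice_natCast, show m + 4 - m = 4 by omega] at he
  rw [Int.toNat_natCast, ← he]
  exact List.take_prefix _ _

theorem pv_main : ∀ (lines : List String), lines ≠ [] →
    extract_quoted_block_py lines = extract_quoted_block_py_alt lines := by
  intro lines hpre
  unfold extract_quoted_block_py extract_quoted_block_py_alt
  simp only [show (" -lc".toList : List Char) = [' ', '-', 'l', 'c'] from rfl,
    show (" -c".toList : List Char) = [' ', '-', 'c'] from rfl]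
  cases hmin : PySem.List.min? (([PySem.Chars.find (PySem.Chars.join ['\n'] (lines.map String.toList)) [' ', '-', 'l', 'c'],
      PySem.Chars.find (PySem.Chars.join ['\n'] (lines.map String.toList)) [' ', '-', 'c']]).filter (fun i => i != -1)) id with
  | none => simp [hmin]
  | some start =>
    simp only [hmin]
    set F := PySem.Chars.join ['\n'] (lines.map String.toList) with hF
    set L := PySem.Chars.find F [' ', '-', 'l', 'c'] with hL
    set C := PySem.Chars.find F [' ', '-', 'c'] with hC
    have hmem := PySem.List.min?_mem hmin
    have hisMin := PySem.List.min?_isMin hmin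
    have hstart : start = L ∨ start = C := by
      rcases List.mem_filter.1 hmem with ⟨hm, _⟩
      simpa using hm
    have hne : start ≠ -1 := by
      rcases List.mem_filter.1 hmem with ⟨_, hp⟩
      simpa using hp
    have h0s : (0 : Int) ≤ start := by
      rcases hstart with h | h <;> subst h
      · have := PySem.Chars.neg_one_le_find F [' ', '-', 'l', 'c']
        rw [← hL] at this; omega
      · have := PySem.Chars.neg_one_le_find F [' ', '-', 'c']
        rw [← hC] at this; omega
    have hle_L : L ≠ -1 → start ≤ L := by
      intro h
      exact hisMin L (List.mem_filter.2 ⟨by simp, by simpa using h⟩)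
    by_cases hLeq : start = L
    · have hLne : L ≠ -1 := hLeq ▸ hne
      have h0L : (0 : Int) ≤ L := by
        have := PySem.Chars.neg_one_le_find F [' ', '-', 'l', 'c']
        rw [← hL] at this; omega
      have hpL : [' ', '-', 'l', 'c'] <+: F.drop start.toNat := by
        have := (PySem.Chars.find_spec (s := F) (sub := [' ', '-', 'l', 'c']) (by rw [← hL]; exact h0L)).1
        rw [← hL] at this
        rw [hLeq]; exact this
      have hslice : PySem.Chars.slice F (some start) (some (start + 4)) = [' ', '-', 'l', 'c'] :=
        pv_slice_of_prefix h0s hpL rfl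
      have hb : start.toNat + 4 ≤ F.length := by
        have := hpL.length_le
        simp at this
        omega
      rw [if_pos hLeq, if_pos hslice,
        show start + ((4 : Nat) : Int) = ((start.toNat + 4 : Nat) : Int) by omega]
      exact pvTailEq lines F (start.toNat + 4) hb
    · have hCeq : start = C := hstart.resolve_left hLeq
      have hslice : PySem.Chars.slice F (some start) (some (start + 4)) ≠ [' ', '-', 'l', 'c'] := by
        intro he
        have hp := pv_prefix_of_slice h0s he
        obtain ⟨hne', hle'⟩ := pv_find_facts (sub := [' ', '-', 'l', 'c']) h0s hp
        rw [← hL] at hne' hle'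
        exact hLeq (le_antisymm (hle_L hne') hle')
      have h0C : (0 : Int) ≤ C := by
        have := PySem.Chars.neg_one_le_find F [' ', '-', 'c']
        rw [← hC] at this; omega
      have hpC : [' ', '-', 'c'] <+: F.drop start.toNat := by
        have := (PySem.Chars.find_spec (s := F) (sub := [' ', '-', 'c']) (by rw [← hC]; exact h0C)).1
        rw [← hC] at this
        rw [hCeq]; exact this
      have hb : start.toNat + 3 ≤ F.length := by
        have := hpC.length_le
        simp at this
        omega
      rw [if_neg hLeq, if_neg hslice,
        show start + ((3 : Nat) : Int) = ((start.toNat + 3 : Nat) : Int) by omega]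
      exact pvTailEq lines F (start.toNat + 3) hb

-- ===== VERDICT (by name: the statement is the Claim_ definition above) =====
theorem extract_quoted_block_py_spec : Claim_equal_extract_quoted_block_py := by
  intro lines _ hpre
  unfold Pre_extract_quoted_block_py at hpre
  unfold Spec_extract_quoted_block_py
  exact pv_main lines hpre
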